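-- pv_equiv track=rewrite | github.com/bconstantine/LeetCodesCollection | Tsinghua OJ Trial/Number.py | getAnsWithoutMemoization
-- ===== SOURCE A (Python) =====
-- def getAnsWithoutMemoization(ans):
--     if(ans < 1):
--         return -1
--     count = 0
--     if ans == 1:
--         return count
--     while(ans > 1):
--         if ans % 2 == 0:
--             ans //= 2
--         elif ans % 3 == 0:
--             ans //= 3
--             count +=1
--         elif ans % 5 == 0:
--             ans //= 5
--             count += 2
--         elif ans % 7 == 0:
--             ans //= 7
--             count += 3
--         else:
--             return -1
--         count += 1
--
--     if ans == 1:
--         return count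
--     else:
--         return -1
-- ===== SOURCE B (Python) =====
-- def _val(n, p):
--     # multiplicity of p in n and the cofactor, by recursive squaring of p
--     if n % p != 0:
--         return 0, n
--     e, m = _val(n, p * p)
--     if m % p == 0:
--         return 2 * e + 1, m // p
--     return 2 * e, m
--
--
-- def getAnsWithoutMemoization(ans):
--     if ans < 1:
--         return -1
--     total = 0
--     for w, p in enumerate((2, 3, 5, 7), 1):
--         e, ans = _val(ans, p)
--         total += w * e
--     return total if ans == 1 else -1
-- ===== Notes on version B (the rewrite author's own statement) =====
-- stated objective: alternative
-- what changed: Replaces A's single interleaved trial-division while-loop by per-prime multiplicity extraction via recursive squaring of the prime (binary-splitting valuation: the multiplicity of p is computed from the multiplicity of p^2), summing weighted exponents 1*e2+2*e3+3*e5+4*e7 and checking the final cofactor.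
import Mathlib
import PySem

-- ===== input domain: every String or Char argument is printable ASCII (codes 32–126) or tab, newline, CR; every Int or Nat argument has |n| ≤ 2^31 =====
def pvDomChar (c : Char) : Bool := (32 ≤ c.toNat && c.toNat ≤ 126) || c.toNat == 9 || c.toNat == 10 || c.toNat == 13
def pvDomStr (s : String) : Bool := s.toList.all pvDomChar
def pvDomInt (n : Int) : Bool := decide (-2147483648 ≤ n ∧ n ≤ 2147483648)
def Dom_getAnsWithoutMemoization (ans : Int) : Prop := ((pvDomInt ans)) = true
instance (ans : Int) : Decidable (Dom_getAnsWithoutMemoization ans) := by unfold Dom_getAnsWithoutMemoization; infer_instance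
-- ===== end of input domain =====

-- B replaces A's interleaved trial-division loop by per-prime multiplicity
-- extraction via recursive squaring of the prime, summing weighted exponents;
-- objective: alternative algorithm, same asymptotic cost.

-- termination helper used by the ports (cited by name in decreasing_by)
theorem pv_fdiv_toNat_lt (ans p : Int) (h1 : 1 < ans) (hp : 2 ≤ p) :
    (PySem.Int.floordiv ans p).toNat < ans.toNat := by
  rw [PySem.Int.floordiv_eq_ediv_of_pos (by omega)]
  have hq0 : 0 ≤ ans / p := Int.ediv_nonneg (by omega) (by omega)
  have heq := Int.mul_ediv_add_emod ans p
  have hr0 : 0 ≤ ans % p := Int.emod_nonneg ans (by omega)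
  have h2q : 2 * (ans / p) ≤ ans := by
    nlinarith [mul_nonneg (show (0:ℤ) ≤ p - 2 by omega) hq0]
  omega

-- termination helper for pvVal's squaring recursion (cited in decreasing_by)
theorem pv_sq_measure_lt (n p : Int) (hp : 2 ≤ p) (hn : 1 ≤ n)
    (hm : PySem.Int.mod n p = 0) :
    2 * n.toNat + 2 - (p * p).toNat < 2 * n.toNat + 2 - p.toNat := by
  have hd : p ∣ n := (PySem.Int.mod_eq_zero_iff_dvd n p).mp hm
  have hpn : p ≤ n := Int.le_of_dvd (by omega) hd
  have h1 : p.toNat ≤ n.toNat := by omega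
  have h2 : 2 ≤ p.toNat := by omega
  have h3 : (p * p).toNat = p.toNat * p.toNat := by
    rw [Int.toNat_mul] <;> omega
  have h4 : p.toNat < p.toNat * p.toNat := by nlinarith
  omega

-- ===== PORT A =====
-- A's while-loop: each iteration divides by the first of 2,3,5,7 that divides ans
-- (adding 1,2,3,4 to count: the branch's increment plus the trailing 'count += 1'),
-- or returns -1; after the loop, 'if ans == 1 then count else -1'.
def pvLoopA (ans count : Int) : Int :=
  if h1 : 1 < ans then
    if PySem.Int.mod ans 2 = 0 then pvLoopA (PySem.Int.floordiv ans 2) (count + 1)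
    else if PySem.Int.mod ans 3 = 0 then pvLoopA (PySem.Int.floordiv ans 3) (count + 2)
    else if PySem.Int.mod ans 5 = 0 then pvLoopA (PySem.Int.floordiv ans 5) (count + 3)
    else if PySem.Int.mod ans 7 = 0 then pvLoopA (PySem.Int.floordiv ans 7) (count + 4)
    else -1
  else if ans = 1 then count else -1
termination_by ans.toNat
decreasing_by all_goals exact pv_fdiv_toNat_lt _ _ h1 (by omega)

def getAnsWithoutMemoization (ans : Int) : Int :=
  if ans < 1 then -1
  else if ans = 1 then 0        -- count = 0; 'if ans == 1: return count'
  else pvLoopA ans 0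

-- ===== PORT B =====
-- Source B's _val(n, p): multiplicity of p in n and the cofactor, by recursive
-- squaring of p.  The extra '2 ≤ p ∧ 1 ≤ n' conjuncts only make the recursion
-- total in Lean; at every call site p ∈ {2,3,5,7} (or a square of one) and
-- n ≥ 1, where they hold, so this computes exactly what _val computes.
def pvVal (n p : Int) : Int × Int :=
  if h : 2 ≤ p ∧ 1 ≤ n ∧ PySem.Int.mod n p = 0 then
    let r := pvVal n (p * p)
    if PySem.Int.mod r.2 p = 0 then (2 * r.1 + 1, PySem.Int.floordiv r.2 p)
    else (2 * r.1, r.2)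
  else (0, n)
termination_by 2 * n.toNat + 2 - p.toNat
decreasing_by exact pv_sq_measure_lt n p h.1 h.2.1 h.2.2

-- 'for w, p in enumerate((2,3,5,7), 1): e, ans = _val(ans, p); total += w * e'
-- on the state (ans, total), then 'return total if ans == 1 else -1'
def getAnsWithoutMemoization_alt (ans : Int) : Int :=
  if ans < 1 then -1
  else
    let s := [((1:Int),(2:Int)), (2,3), (3,5), (4,7)].foldl
      (fun (acc : Int × Int) (wp : Int × Int) =>
        let r := pvVal acc.1 wp.2
        (r.2, acc.2 + wp.1 * r.1)) (ans, 0)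
    if s.1 = 1 then s.2 else -1

-- ===== PRECONDITION & SPEC =====
def Spec_getAnsWithoutMemoization (ans : Int) (out : Int) : Prop := out = getAnsWithoutMemoization_alt ans
instance (ans : Int) (out : Int) : Decidable (Spec_getAnsWithoutMemoization ans out) := by unfold Spec_getAnsWithoutMemoization; infer_instance

-- ===== CLAIM (what is proved, stated in full; the proofs are below) =====
def Claim_equal_getAnsWithoutMemoization : Prop := ∀ (ans : Int), Dom_getAnsWithoutMemoization ans → Spec_getAnsWithoutMemoization ans (getAnsWithoutMemoization ans)

-- ===== LEMMAS AND PROOFS =====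

-- proof-only model of a plain 'divide out all p, add w each time' loop,
-- used as the bridge between A's interleaved loop and B's valuations
def pvDivOut (p w : Int) (s : Int × Int) : Int × Int :=
  if h : 1 < p ∧ 1 < s.1 ∧ PySem.Int.mod s.1 p = 0 then
    pvDivOut p w (PySem.Int.floordiv s.1 p, s.2 + w)
  else s
termination_by s.1.toNat
decreasing_by exact pv_fdiv_toNat_lt _ _ h.2.1 (by omega)

-- one unfolding of pvDivOut when p divides
theorem pvDivOut_step (p w a c : Int) (hp : 1 < p) (h1 : 1 < a)
    (hm : PySem.Int.mod a p = 0) :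
    pvDivOut p w (a, c) = pvDivOut p w (PySem.Int.floordiv a p, c + w) := by
  rw [pvDivOut, dif_pos ⟨hp, h1, hm⟩]

-- pvDivOut is the identity when p does not divide
theorem pvDivOut_id (p w a c : Int) (hm : PySem.Int.mod a p ≠ 0) :
    pvDivOut p w (a, c) = (a, c) := by
  rw [pvDivOut, dif_neg (fun h => hm h.2.2)]

-- exact division: a = p * (a // p) when p ∣ a
theorem pv_exact (p a : Int) (hp : 0 < p) (hd : p ∣ a) :
    a = p * PySem.Int.floordiv a p := by
  rw [PySem.Int.floordiv_eq_ediv_of_pos hp, Int.mul_ediv_cancel' hd]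

-- the quotient stays ≥ 1
theorem pv_quot_ge_one (p a : Int) (hp : 0 < p) (h1 : 1 ≤ a) (hd : p ∣ a) :
    1 ≤ PySem.Int.floordiv a p := by
  rw [PySem.Int.le_floordiv_iff_mul_le hp]
  have := Int.le_of_dvd (by omega) hd
  omega

-- q not dividing a does not divide a // p either (when p ∣ a)
theorem pv_pres (p q a : Int) (hp : 0 < p)
    (hdp : PySem.Int.mod a p = 0) (hq : PySem.Int.mod a q ≠ 0) :
    PySem.Int.mod (PySem.Int.floordiv a p) q ≠ 0 := by
  intro hk
  have hdp' := (PySem.Int.mod_eq_zero_iff_dvd a p).mp hdp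
  have hk' := (PySem.Int.mod_eq_zero_iff_dvd _ q).mp hk
  exact hq ((PySem.Int.mod_eq_zero_iff_dvd a q).mpr
    (by rw [pv_exact p a hp hdp']; exact hk'.mul_left p))

-- pvVal n p returns (e, m) with n = p^e * m, p ∤ m, m ≥ 1
theorem pvVal_spec : ∀ (μ : Nat) (n p : Int), 2 * n.toNat + 2 - p.toNat = μ →
    2 ≤ p → 1 ≤ n →
    ∃ k : Nat, (pvVal n p).1 = (k : Int) ∧ n = p ^ k * (pvVal n p).2 ∧
      PySem.Int.mod (pvVal n p).2 p ≠ 0 ∧ 1 ≤ (pvVal n p).2 := by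
  intro μ
  induction μ using Nat.strong_induction_on with
  | _ μ ih =>
    intro n p hμ hp hn
    by_cases hm : PySem.Int.mod n p = 0
    · have hrec := ih _ (hμ ▸ pv_sq_measure_lt n p hp hn hm) n (p * p) rfl
        (by nlinarith) hn
      obtain ⟨k, he, hfac, hnd, hm1⟩ := hrec
      rw [pvVal, dif_pos ⟨hp, hn, hm⟩]
      set r := pvVal n (p * p) with hr
      by_cases hmp : PySem.Int.mod r.2 p = 0
      · -- p divides the cofactor of p²: exponent 2k+1, cofactor r.2 / p
        have hd : p ∣ r.2 := (PySem.Int.mod_eq_zero_iff_dvd _ p).mp hmp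
        rw [if_pos hmp]
        refine ⟨2 * k + 1, ?_, ?_, ?_, ?_⟩
        · simp only [he]; push_cast; ring
        ·
          have h2 : r.2 = p * PySem.Int.floordiv r.2 p := pv_exact p r.2 (by omega) hd
          calc n = (p * p) ^ k * r.2 := hfac
            _ = (p * p) ^ k * (p * PySem.Int.floordiv r.2 p) := by rw [← h2]
            _ = p ^ (2 * k + 1) * PySem.Int.floordiv r.2 p := by ring
        · intro hk
          have hdq : p ∣ PySem.Int.floordiv r.2 p :=
            (PySem.Int.mod_eq_zero_iff_dvd _ p).mp hk
          obtain ⟨t, ht⟩ := hdq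
          have h2 : r.2 = p * PySem.Int.floordiv r.2 p := pv_exact p r.2 (by omega) hd
          apply hnd
          rw [PySem.Int.mod_eq_zero_iff_dvd]
          exact ⟨t, by rw [h2, ht]; ring⟩
        · exact pv_quot_ge_one p r.2 (by omega) hm1 hd
      · rw [if_neg hmp]
        refine ⟨2 * k, ?_, ?_, ?_, ?_⟩
        · simp only [he]; push_cast; ring
        · rw [hfac]
          have : p * p = p ^ 2 := by ring
          rw [this, ← pow_mul]
        · exact hmp
        · exact hm1
    · rw [pvVal, dif_neg (fun h => hm h.2.2)]
      exact ⟨0, by simp, by simp, hm, hn⟩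

-- pvDivOut on p^k * m with p ∤ m divides out exactly k times
theorem pvDivOut_pow (p w : Int) (hp : 2 ≤ p) :
    ∀ (k : Nat) (m c : Int), 1 ≤ m → PySem.Int.mod m p ≠ 0 →
      pvDivOut p w (p ^ k * m, c) = (m, c + w * k) := by
  intro k
  induction k with
  | zero => intro m c _ hnd; simp [pvDivOut_id p w m c hnd]
  | succ k ihk =>
    intro m c hm hnd
    have hpk : (1:Int) ≤ p ^ k := one_le_pow₀ (by omega)
    have hgt : 1 < p ^ (k + 1) * m := by
      have : p ≤ p ^ (k + 1) := le_self_pow₀ (by omega) (by omega)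
      nlinarith
    have hd : p ∣ p ^ (k + 1) * m := by
      exact Dvd.dvd.mul_right (dvd_pow_self p (Nat.succ_ne_zero k)) m
    have hmod : PySem.Int.mod (p ^ (k + 1) * m) p = 0 :=
      (PySem.Int.mod_eq_zero_iff_dvd _ p).mpr hd
    rw [pvDivOut_step p w _ c (by omega) hgt hmod]
    have hfd : PySem.Int.floordiv (p ^ (k + 1) * m) p = p ^ k * m := by
      rw [PySem.Int.floordiv_eq_ediv_of_pos (by omega), pow_succ]
      rw [show p ^ k * p * m = p * (p ^ k * m) by ring]
      exact Int.mul_ediv_cancel_left _ (by omega)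
    rw [hfd, ihk m (c + w) hm hnd]
    simp only [Prod.mk.injEq, true_and]
    push_cast; ring

-- one stage: pvDivOut computes what pvVal describes
theorem pv_stage (p w n c : Int) (hp : 2 ≤ p) (hn : 1 ≤ n) :
    pvDivOut p w (n, c) = ((pvVal n p).2, c + w * (pvVal n p).1) ∧
      1 ≤ (pvVal n p).2 := by
  obtain ⟨k, he, hfac, hnd, hm1⟩ := pvVal_spec _ n p rfl hp hn
  constructor
  · conv_lhs => rw [hfac]
    rw [pvDivOut_pow p w hp k _ c hm1 hnd, he]
  · exact hm1

-- main invariant: for ans ≥ 1, A's interleaved loop equals four divide-out loops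
theorem pv_main : ∀ (n : Nat) (ans count : Int), ans.toNat = n → 1 ≤ ans →
    pvLoopA ans count =
      (fun s : Int × Int => if s.1 = 1 then s.2 else -1)
        (pvDivOut 7 4 (pvDivOut 5 3 (pvDivOut 3 2 (pvDivOut 2 1 (ans, count))))) := by
  intro n
  induction n using Nat.strong_induction_on with
  | _ n ih =>
    intro ans count hn hge
    by_cases h1 : 1 < ans
    · by_cases h2 : PySem.Int.mod ans 2 = 0
      · have hd : (2:Int) ∣ ans := (PySem.Int.mod_eq_zero_iff_dvd ans 2).mp h2
        rw [pvLoopA, dif_pos h1, if_pos h2,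
          pvDivOut_step 2 1 ans count (by omega) h1 h2]
        exact ih _ (hn ▸ pv_fdiv_toNat_lt ans 2 h1 (by omega)) _ _ rfl
          (pv_quot_ge_one 2 ans (by omega) hge hd)
      · by_cases h3 : PySem.Int.mod ans 3 = 0
        · have hd : (3:Int) ∣ ans := (PySem.Int.mod_eq_zero_iff_dvd ans 3).mp h3
          have hk2 := pv_pres 3 2 ans (by omega) h3 h2
          rw [pvLoopA, dif_pos h1, if_neg h2, if_pos h3,
            pvDivOut_id 2 1 ans count h2,
            pvDivOut_step 3 2 ans count (by omega) h1 h3,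
            ← pvDivOut_id 2 1 (PySem.Int.floordiv ans 3) (count + 2) hk2]
          exact ih _ (hn ▸ pv_fdiv_toNat_lt ans 3 h1 (by omega)) _ _ rfl
            (pv_quot_ge_one 3 ans (by omega) hge hd)
        · by_cases h5 : PySem.Int.mod ans 5 = 0
          · have hd : (5:Int) ∣ ans := (PySem.Int.mod_eq_zero_iff_dvd ans 5).mp h5
            have hk2 := pv_pres 5 2 ans (by omega) h5 h2
            have hk3 := pv_pres 5 3 ans (by omega) h5 h3
            rw [pvLoopA, dif_pos h1, if_neg h2, if_neg h3, if_pos h5,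
              pvDivOut_id 2 1 ans count h2, pvDivOut_id 3 2 ans count h3,
              pvDivOut_step 5 3 ans count (by omega) h1 h5,
              ← pvDivOut_id 3 2 (PySem.Int.floordiv ans 5) (count + 3) hk3,
              ← pvDivOut_id 2 1 (PySem.Int.floordiv ans 5) (count + 3) hk2]
            exact ih _ (hn ▸ pv_fdiv_toNat_lt ans 5 h1 (by omega)) _ _ rfl
              (pv_quot_ge_one 5 ans (by omega) hge hd)
          · by_cases h7 : PySem.Int.mod ans 7 = 0
            · have hd : (7:Int) ∣ ans := (PySem.Int.mod_eq_zero_iff_dvd ans 7).mp h7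
              have hk2 := pv_pres 7 2 ans (by omega) h7 h2
              have hk3 := pv_pres 7 3 ans (by omega) h7 h3
              have hk5 := pv_pres 7 5 ans (by omega) h7 h5
              rw [pvLoopA, dif_pos h1, if_neg h2, if_neg h3, if_neg h5, if_pos h7,
                pvDivOut_id 2 1 ans count h2, pvDivOut_id 3 2 ans count h3,
                pvDivOut_id 5 3 ans count h5,
                pvDivOut_step 7 4 ans count (by omega) h1 h7,
                ← pvDivOut_id 5 3 (PySem.Int.floordiv ans 7) (count + 4) hk5,
                ← pvDivOut_id 3 2 (PySem.Int.floordiv ans 7) (count + 4) hk3,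
                ← pvDivOut_id 2 1 (PySem.Int.floordiv ans 7) (count + 4) hk2]
              exact ih _ (hn ▸ pv_fdiv_toNat_lt ans 7 h1 (by omega)) _ _ rfl
                (pv_quot_ge_one 7 ans (by omega) hge hd)
            · rw [pvDivOut_id 2 1 ans count h2, pvDivOut_id 3 2 ans count h3,
                pvDivOut_id 5 3 ans count h5, pvDivOut_id 7 4 ans count h7,
                pvLoopA, dif_pos h1, if_neg h2, if_neg h3, if_neg h5, if_neg h7]
              simp only []
              rw [if_neg (show ans ≠ 1 by omega)]
    · have he : ans = 1 := by omega
      subst he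
      rw [pvDivOut_id 2 1 1 count (by decide), pvDivOut_id 3 2 1 count (by decide),
        pvDivOut_id 5 3 1 count (by decide), pvDivOut_id 7 4 1 count (by decide),
        pvLoopA, dif_neg (by decide), if_pos rfl]
      simp

-- the four-stage pvDivOut chain equals B's foldl over (w,p) pairs
theorem pv_chain (ans : Int) (hge : 1 ≤ ans) :
    pvDivOut 7 4 (pvDivOut 5 3 (pvDivOut 3 2 (pvDivOut 2 1 (ans, 0)))) =
      [((1:Int),(2:Int)), (2,3), (3,5), (4,7)].foldl
        (fun (acc : Int × Int) (wp : Int × Int) =>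
          let r := pvVal acc.1 wp.2
          (r.2, acc.2 + wp.1 * r.1)) (ans, 0) := by
  obtain ⟨e2, hm2⟩ := pv_stage 2 1 ans 0 (by omega) hge
  obtain ⟨e3, hm3⟩ := pv_stage 3 2 (pvVal ans 2).2 _ (by omega) hm2
  obtain ⟨e5, hm5⟩ := pv_stage 5 3 (pvVal (pvVal ans 2).2 3).2 _ (by omega) hm3
  obtain ⟨e7, hm7⟩ := pv_stage 7 4 (pvVal (pvVal (pvVal ans 2).2 3).2 5).2 _ (by omega) hm5
  simp only [List.foldl]
  rw [e2, e3, e5, e7]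

-- ===== VERDICT (by name: the statement is the Claim_ definition above) =====
theorem getAnsWithoutMemoization_spec : Claim_equal_getAnsWithoutMemoization := by
  intro ans _
  unfold Spec_getAnsWithoutMemoization getAnsWithoutMemoization getAnsWithoutMemoization_alt
  by_cases hlt : ans < 1
  · simp [hlt]
  · rw [if_neg hlt, if_neg hlt]
    simp only []
    rw [← pv_chain ans (by omega)]
    by_cases h1 : ans = 1
    · subst h1
      rw [if_pos rfl,
        pvDivOut_id 2 1 1 0 (by decide), pvDivOut_id 3 2 1 0 (by decide),
        pvDivOut_id 5 3 1 0 (by decide), pvDivOut_id 7 4 1 0 (by decide)]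
      simp
    · rw [if_neg h1]
      exact pv_main ans.toNat ans 0 rfl (by omega)
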